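-- pv_equiv track=rewrite | github.com/paiml/depyler | examples/hard_edge_string_build.py | build_alphabet
-- ===== SOURCE A (Python) =====
-- def build_alphabet(n: int) -> str:
--     """Build first n letters of alphabet."""
--     result: str = ""
--     i: int = 0
--     while i < n:
--         code: int = 97 + i
--         if code > 122:
--             code = 122
--         result = result + chr(code)
--         i = i + 1
--     return result
-- ===== SOURCE B (Python) =====
-- def build_alphabet(n: int) -> str:
--     """Build first n letters of alphabet."""
--     alphabet = "abcdefghijklmnopqrstuvwxyz"
--     if n <= 0:
--         return ""
--     if n <= 26:
--         return alphabet[:n]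
--     return alphabet + "z" * (n - 26)
-- ===== Notes on version B (the rewrite author's own statement) =====
-- stated objective: faster
-- what changed: Replaces the per-character clamp-and-append loop with a closed form: slice a fixed alphabet constant while n is within the alphabet, append repeated 'z' beyond it.
import Mathlib
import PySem

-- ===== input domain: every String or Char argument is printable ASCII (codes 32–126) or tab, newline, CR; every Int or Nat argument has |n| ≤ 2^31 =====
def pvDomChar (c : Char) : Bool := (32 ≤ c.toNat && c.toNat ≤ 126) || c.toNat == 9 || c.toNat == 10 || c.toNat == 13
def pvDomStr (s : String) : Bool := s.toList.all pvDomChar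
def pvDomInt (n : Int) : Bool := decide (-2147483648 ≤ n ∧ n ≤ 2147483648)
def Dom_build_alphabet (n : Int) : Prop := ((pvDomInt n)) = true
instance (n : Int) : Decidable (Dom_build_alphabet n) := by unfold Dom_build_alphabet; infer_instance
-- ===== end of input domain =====

-- B replaces A's per-character clamp-and-append loop by a closed form: slice a fixed
-- alphabet constant for n ≤ 26, append repeated 'z' otherwise (objective: faster).

-- ===== PORT A =====
-- while i < n: code = 97+i; clamp at 122; result += chr(code)   (loop = foldl over range(n))
def build_alphabet (n : Int) : String :=
  String.ofList
    ((PySem.List.pyRange 0 n 1).foldl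
      (fun result i =>
        let code : Int := 97 + i
        let code : Int := if code > 122 then 122 else code
        result ++ [Char.ofNat code.toNat]) [])

-- ===== PORT B =====
def build_alphabet_alt (n : Int) : String :=
  let alphabet := "abcdefghijklmnopqrstuvwxyz"
  if n ≤ 0 then ""
  else if n ≤ 26 then String.ofList (PySem.List.slice alphabet.toList none (some n))
  else String.ofList (alphabet.toList ++ PySem.List.pyRepeat ['z'] (n - 26))

-- ===== PRECONDITION & SPEC =====
def Spec_build_alphabet (n : Int) (out : String) : Prop := out = build_alphabet_alt n
instance (n : Int) (out : String) : Decidable (Spec_build_alphabet n out) := by unfold Spec_build_alphabet; infer_instance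

-- ===== CLAIM (what is proved, stated in full; the proofs are below) =====
def Claim_equal_build_alphabet : Prop := ∀ (n : Int), Dom_build_alphabet n → Spec_build_alphabet n (build_alphabet n)

-- ===== LEMMAS AND PROOFS =====

-- Characterisation of A's loop after k iterations.
lemma pvFoldA_eq (k : Nat) :
    (PySem.List.pyRange 0 (k : Int) 1).foldl
      (fun result i =>
        let code : Int := 97 + i
        let code : Int := if code > 122 then 122 else code
        result ++ [Char.ofNat code.toNat]) []
    = if k ≤ 26 then ("abcdefghijklmnopqrstuvwxyz".toList).take k
      else "abcdefghijklmnopqrstuvwxyz".toList ++ List.replicate (k - 26) 'z' := by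
  induction k with
  | zero => simp [PySem.List.pyRange_one_eq_nil]
  | succ k ih =>
    rw [show ((k + 1 : Nat) : Int) = (k : Int) + 1 by push_cast; ring,
        PySem.List.pyRange_one_succ_right (show (0:Int) ≤ (k:Int) by omega),
        List.foldl_append, ih]
    simp only [List.foldl_cons, List.foldl_nil]
    by_cases h1 : k + 1 ≤ 26
    · have hk26 : k ≤ 26 := by omega
      have hc : ¬ (97 + (k : Int) > 122) := by omega
      rw [if_pos hk26, if_pos h1, if_neg hc]
      have hk25 : k ≤ 25 := by omega
      interval_cases k <;> decide
    · by_cases h2 : k ≤ 26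
      · have hk : k = 26 := by omega
        subst hk
        decide
      · have hc : 97 + (k : Int) > 122 := by omega
        have hs : k + 1 - 26 = (k - 26) + 1 := by omega
        rw [if_neg h2, if_neg h1, if_pos hc, hs,
            List.replicate_succ', List.append_assoc]
        norm_num
        decide

-- ===== VERDICT (by name: the statement is the Claim_ definition above) =====
theorem build_alphabet_spec : Claim_equal_build_alphabet := by
  intro n _
  unfold Spec_build_alphabet build_alphabet build_alphabet_alt
  by_cases hn : n ≤ 0
  · rw [PySem.List.pyRange_one_eq_nil hn, if_pos hn]
    rfl
  · have hk : n = ((n.toNat : Nat) : Int) := by omega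
    rw [if_neg hn, hk, pvFoldA_eq]
    by_cases h26 : n.toNat ≤ 26
    · rw [if_pos h26, if_pos (by omega), PySem.List.slice_to_natCast]
    · rw [if_neg h26, if_neg (by omega), PySem.List.pyRepeat_singleton]
      have : ((n.toNat : Int) - 26).toNat = n.toNat - 26 := by omega
      rw [this]
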